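-- pv_equiv track=rewrite | github.com/AlexandrNikitenko97/CodeFights-Company-Bots- | SpaceBot/launchSequenceChecker.py | launchSequenceChecker
-- ===== SOURCE A (Python) =====
-- def launchSequenceChecker(systemNames, stepNumbers):
--     matched = {}
--     result = []
--     for i in range(len(systemNames)):
--         if systemNames[i] not in matched:
--             matched[systemNames[i]] = [stepNumbers[i]]
--         else:
--             matched[systemNames[i]].append(stepNumbers[i])
--     for value in matched.values():
--         if len(value) == 1:
--             result.append(True)
--         else:
--             for i in range(len(value)-1):
--                 if value[i] >= value[i+1]:
--                     result.append(False)
--                     break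
--             else:
--                 result.append(True)
--     return True if sum(result) == len(matched) else False
-- ===== SOURCE B (Python) =====
-- def launchSequenceChecker(systemNames, stepNumbers):
--     last = {}
--     ok = True
--     for name, step in zip(systemNames, stepNumbers):
--         if name in last and step <= last[name]:
--             ok = False
--         last[name] = step
--     return ok
-- ===== Notes on version B (the rewrite author's own statement) =====
-- stated objective: simpler
-- what changed: Instead of first grouping all steps per system into a dict of lists and then scanning every group with an indexed inner loop and a boolean result list, B makes a single pass over the zipped input keeping only the last step seen per system and one overall flag.
import Mathlib
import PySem

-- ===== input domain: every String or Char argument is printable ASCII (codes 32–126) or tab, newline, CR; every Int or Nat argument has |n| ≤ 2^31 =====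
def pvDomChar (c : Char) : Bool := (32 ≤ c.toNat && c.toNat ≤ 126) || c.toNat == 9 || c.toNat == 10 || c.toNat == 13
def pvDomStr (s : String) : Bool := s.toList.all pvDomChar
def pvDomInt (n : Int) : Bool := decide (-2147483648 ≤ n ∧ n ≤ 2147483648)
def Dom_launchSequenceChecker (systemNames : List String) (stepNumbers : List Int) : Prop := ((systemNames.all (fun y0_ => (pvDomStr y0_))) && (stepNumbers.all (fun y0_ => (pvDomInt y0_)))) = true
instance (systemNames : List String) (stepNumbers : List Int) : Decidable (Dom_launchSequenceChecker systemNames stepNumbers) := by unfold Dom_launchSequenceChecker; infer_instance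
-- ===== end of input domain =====

-- B replaces A's dict-of-step-lists plus second validation pass by one pass over the zipped
-- inputs keeping only the last step per system and a single boolean flag (objective: simpler).

-- ===== PORT A =====
-- A's inner 'for i in range(len(value)-1): if value[i] >= value[i+1]: append False; break / else: append True'
def lscInner (v : List Int) : List Int → Bool
  | [] => true
  | i :: rest =>
    if PySem.List.pyGetD v i 0 ≥ PySem.List.pyGetD v (i + 1) 0 then false
    else lscInner v rest

def launchSequenceChecker (systemNames : List String) (stepNumbers : List Int) : Bool :=
  let matched : PySem.Dict String (List Int) :=
    (PySem.List.pyRange 0 (PySem.List.len systemNames) 1).foldl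
      (fun m i =>
        let name := PySem.List.pyGetD systemNames i ""
        let step := PySem.List.pyGetD stepNumbers i 0
        if m.contains name = false then m.insert name [step]
        else m.modify name [] (fun l => l ++ [step]))
      PySem.Dict.empty
  let result : List Bool :=
    matched.values.foldl
      (fun res v =>
        if PySem.List.len v == 1 then res ++ [true]
        else res ++ [lscInner v (PySem.List.pyRange 0 (PySem.List.len v - 1) 1)])
      []
  if (result.map (fun b => if b then (1 : Int) else 0)).sum == (matched.size : Int) then true
  else false

-- ===== PORT B =====
def launchSequenceChecker_alt (systemNames : List String) (stepNumbers : List Int) : Bool :=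
  ((systemNames.zip stepNumbers).foldl
    (fun st p =>
      let ok := if st.1.contains p.1 && decide (p.2 ≤ st.1.getD p.1 0) then false else st.2
      (st.1.insert p.1 p.2, ok))
    ((PySem.Dict.empty : PySem.Dict String Int), true)).2

-- ===== PRECONDITION & SPEC =====
-- A indexes stepNumbers[i] for every i < len(systemNames), so it raises IndexError whenever
-- stepNumbers is shorter than systemNames; Pre_ excludes exactly those inputs.
def Pre_launchSequenceChecker (systemNames : List String) (stepNumbers : List Int) : Prop :=
  systemNames.length ≤ stepNumbers.length
instance (systemNames : List String) (stepNumbers : List Int) : Decidable (Pre_launchSequenceChecker systemNames stepNumbers) := by unfold Pre_launchSequenceChecker; infer_instance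

def pvWitness_launchSequenceChecker : List String × List Int := (["a", "b", "a"], [1, 5, 2])

def Spec_launchSequenceChecker (systemNames : List String) (stepNumbers : List Int) (out : Bool) : Prop := out = launchSequenceChecker_alt systemNames stepNumbers
instance (systemNames : List String) (stepNumbers : List Int) (out : Bool) : Decidable (Spec_launchSequenceChecker systemNames stepNumbers out) := by unfold Spec_launchSequenceChecker; infer_instance

-- ===== CLAIM (what is proved, stated in full; the proofs are below) =====
def Claim_equal_launchSequenceChecker : Prop := ∀ (systemNames : List String) (stepNumbers : List Int), Dom_launchSequenceChecker systemNames stepNumbers → Pre_launchSequenceChecker systemNames stepNumbers → Spec_launchSequenceChecker systemNames stepNumbers (launchSequenceChecker systemNames stepNumbers)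

-- ===== LEMMAS AND PROOFS =====

-- the steps recorded for system n, in input order (both programs' shared semantics)
def lscGrp (l : List (String × Int)) (n : String) : List Int :=
  (l.filter (fun p => p.1 == n)).map (·.2)

-- strictly-increasing check on adjacent elements
def lscAdj : List Int → Bool
  | a :: b :: t => decide (a < b) && lscAdj (b :: t)
  | _ => true

theorem lscGrp_append_singleton (l : List (String × Int)) (p : String × Int) (n : String) :
    lscGrp (l ++ [p]) n = lscGrp l n ++ (if p.1 = n then [p.2] else []) := by
  simp only [lscGrp, List.filter_append, List.map_append]
  congr 1
  split_ifs with h <;> simp [h]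

theorem lscGrp_of_not_mem (l : List (String × Int)) (n : String) (h : n ∉ l.map Prod.fst) :
    lscGrp l n = [] := by
  simp only [lscGrp, List.map_eq_nil_iff, List.filter_eq_nil_iff]
  intro p hp hpn
  exact h (List.mem_map.mpr ⟨p, hp, by simpa using hpn⟩)

theorem lscAdj_append_singleton (g : List Int) (x : Int) :
    lscAdj (g ++ [x]) = (lscAdj g && (match g.getLast? with
      | none => true
      | some a => decide (a < x))) := by
  induction g with
  | nil => simp [lscAdj]
  | cons a g ih =>
    cases g with
    | nil => simp [lscAdj]
    | cons b t =>
      simp only [List.cons_append, lscAdj] at *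
      rw [ih]
      simp [Bool.and_assoc, List.getLast?_cons_cons]

theorem lscInner_shift (a : Int) (w : List Int) (ks : List Nat) :
    lscInner (a :: w) (ks.map (fun (k : Nat) => ((1 : Int) + (k : Int))))
      = lscInner w (ks.map (fun (k : Nat) => ((0 : Int) + (k : Int)))) := by
  induction ks with
  | nil => rfl
  | cons k ks ih =>
    rw [List.map_cons, List.map_cons, lscInner, lscInner]
    have h1 : ((1 : Int) + k) = ((k + 1 : Nat) : Int) := by push_cast; ring
    have h2 : ((1 : Int) + k + 1) = ((k + 2 : Nat) : Int) := by push_cast; ring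
    have h3 : ((0 : Int) + k) = ((k : Nat) : Int) := by norm_num
    have h4 : ((0 : Int) + k + 1) = ((k + 1 : Nat) : Int) := by push_cast; ring
    rw [h2, h1, h4, h3, PySem.List.pyGetD_natCast, PySem.List.pyGetD_natCast,
        PySem.List.pyGetD_natCast, PySem.List.pyGetD_natCast]
    have e1 : (a :: w).getD (k + 1) 0 = w.getD k 0 := by simp [List.getD]
    have e2 : (a :: w).getD (k + 2) 0 = w.getD (k + 1) 0 := by simp [List.getD]
    rw [e1, e2]
    split_ifs with h
    · rfl
    · exact ih

theorem lscInner_eq_adj (v : List Int) :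
    lscInner v (PySem.List.pyRange 0 (PySem.List.len v - 1) 1) = lscAdj v := by
  induction v with
  | nil => rfl
  | cons a w ih =>
    cases w with
    | nil => rfl
    | cons b t =>
      rw [PySem.List.pyRange_one_cons (by simp only [PySem.List.len_eq, List.length_cons]; omega),
          lscInner]
      have hg0 : PySem.List.pyGetD (a :: b :: t) 0 0 = a := PySem.List.pyGetD_zero_cons _ _ _
      have hg1 : PySem.List.pyGetD (a :: b :: t) (0 + 1) 0 = b := by
        rw [show (0 : Int) + 1 = ((1 : Nat) : Int) by norm_num, PySem.List.pyGetD_natCast]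
        rfl
      rw [hg0, hg1]
      by_cases hab : a ≥ b
      · simp [hab, lscAdj, show ¬ a < b by omega]
      · rw [if_neg hab]
        have h1 : PySem.List.pyRange 1 (PySem.List.len (a :: b :: t) - 1) 1 =
            (List.range t.length).map (fun (k : Nat) => ((1 : Int) + (k : Int))) := by
          rw [PySem.List.pyRange_one,
              show ((PySem.List.len (a :: b :: t) - 1) - 1).toNat = t.length by
                simp only [PySem.List.len_eq, List.length_cons]; omega]
        have h0 : PySem.List.pyRange 0 (PySem.List.len (b :: t) - 1) 1 =
            (List.range t.length).map (fun (k : Nat) => ((0 : Int) + (k : Int))) := by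
          rw [PySem.List.pyRange_one,
              show ((PySem.List.len (b :: t) - 1) - 0).toNat = t.length by
                simp only [PySem.List.len_eq, List.length_cons]; omega]
        rw [show (0 : Int) + 1 = 1 by norm_num, h1, lscInner_shift, ← h0, ih]
        simp [lscAdj, show a < b by omega]

-- A's index loop over two parallel lists is a fold over the zip
theorem rangeFold {δ : Type} (g : δ → String → Int → δ) :
    ∀ (ns : List String) (ss : List Int) (d : δ), ns.length ≤ ss.length →
      (List.range ns.length).foldl (fun m k => g m (ns.getD k "") (ss.getD k 0)) d
        = (ns.zip ss).foldl (fun m p => g m p.1 p.2) d := by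
  intro ns
  induction ns with
  | nil => intro ss d _; rfl
  | cons a ns ih =>
    intro ss d h
    cases ss with
    | nil => simp at h
    | cons b ss =>
      rw [List.length_cons, List.range_succ_eq_map, List.foldl_cons, List.foldl_map]
      simp only [List.getD_cons_zero, List.getD_cons_succ]
      rw [List.zip_cons_cons, List.foldl_cons]
      exact ih ss (g d a b) (by simpa using h)

theorem pyFold {δ : Type} (g : δ → String → Int → δ) (ns : List String) (ss : List Int) (d : δ)
    (h : ns.length ≤ ss.length) :
    (PySem.List.pyRange 0 (PySem.List.len ns) 1).foldl
        (fun m i => g m (PySem.List.pyGetD ns i "") (PySem.List.pyGetD ss i 0)) d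
      = (ns.zip ss).foldl (fun m p => g m p.1 p.2) d := by
  rw [PySem.List.pyRange_one, show ((PySem.List.len ns) - 0).toNat = ns.length by
        simp only [PySem.List.len_eq]; omega, List.foldl_map]
  rw [← rangeFold g ns ss d h]
  apply PySem.List.foldl_congr_mem
  intro acc k _
  have : (0 : Int) + (k : Int) = ((k : Nat) : Int) := by norm_num
  rw [this, PySem.List.pyGetD_natCast, PySem.List.pyGetD_natCast]

theorem pyFoldA (ns : List String) (ss : List Int) (d : PySem.Dict String (List Int))
    (h : ns.length ≤ ss.length) :
    (PySem.List.pyRange 0 (PySem.List.len ns) 1).foldl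
      (fun m i =>
        if m.contains (PySem.List.pyGetD ns i "") = false then
          m.insert (PySem.List.pyGetD ns i "") [PySem.List.pyGetD ss i 0]
        else m.modify (PySem.List.pyGetD ns i "") [] fun l => l ++ [PySem.List.pyGetD ss i 0]) d
    = (ns.zip ss).foldl
      (fun m p =>
        if m.contains p.1 = false then m.insert p.1 [p.2]
        else m.modify p.1 [] fun l => l ++ [p.2]) d :=
  pyFold (fun m name step =>
    if m.contains name = false then m.insert name [step]
    else m.modify name [] fun l => l ++ [step]) ns ss d h

-- 'matched[name] = [step]' on a fresh key is the same dict update as appending to the default []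
theorem bodyEq (m : PySem.Dict String (List Int)) (name : String) (step : Int) :
    (if m.contains name = false then m.insert name [step]
     else m.modify name [] (fun l => l ++ [step]))
    = m.modify name [] (fun l => l ++ [step]) := by
  split_ifs with h
  · simp [PySem.Dict.insert, PySem.Dict.modify, h,
      PySem.Dict.getD_of_not_contains (d := m) (k := name) (d0 := []) h]
  · rfl

theorem A_iff (ns : List String) (ss : List Int) (h : ns.length ≤ ss.length) :
    (launchSequenceChecker ns ss = true ↔
      ∀ n ∈ (ns.zip ss).map Prod.fst, lscAdj (lscGrp (ns.zip ss) n) = true) := by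
  unfold launchSequenceChecker
  dsimp only
  rw [pyFoldA ns ss _ h]
  simp only [bodyEq]
  set pairs := ns.zip ss with hpairs
  set M := pairs.foldl (fun m p => m.modify p.1 [] (fun l => l ++ [p.2])) PySem.Dict.empty with hM
  have hnd : M.keys.Nodup := PySem.Dict.nodup_keys_foldl_modify_key pairs (fun p => p.1)
    [] (fun _ p => (fun l => l ++ [p.2])) PySem.Dict.empty (by simp)
  have hkeys : M.keys = PySem.Set.ofList (pairs.map (fun p => p.1)) := by
    rw [hM, PySem.Dict.keys_foldl_modify_key]
    simp [PySem.Dict.keys_empty, PySem.Set.update_nil_left]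
  have hget : ∀ n, M.getD n [] = lscGrp pairs n := by
    intro n
    rw [hM, PySem.Dict.getD_foldl_modify_append]
    simp [PySem.Dict.getD_empty, lscGrp]
  have hvals : M.values = M.keys.map (fun k => M.getD k []) :=
    PySem.Dict.values_eq_map_keys M hnd []
  have hbody : (fun (res : List Bool) v =>
        if PySem.List.len v == 1 then res ++ [true]
        else res ++ [lscInner v (PySem.List.pyRange 0 (PySem.List.len v - 1) 1)])
      = fun res v => res ++ [if PySem.List.len v == 1 then true
        else lscInner v (PySem.List.pyRange 0 (PySem.List.len v - 1) 1)] := by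
    funext res v; split_ifs <;> rfl
  rw [hbody, PySem.List.foldl_append_singleton_eq_map]
  have hfA : ∀ v : List Int, (if PySem.List.len v == 1 then true
      else lscInner v (PySem.List.pyRange 0 (PySem.List.len v - 1) 1)) = lscAdj v := by
    intro v
    by_cases h1 : PySem.List.len v == 1
    · rw [if_pos h1]
      match v, h1 with
      | [x], _ => rfl
    · rw [if_neg h1, lscInner_eq_adj]
  simp only [hfA, List.nil_append]
  rw [hvals, hkeys]
  rw [PySem.List.sum_map_ite_one_zero]
  simp only [List.map_map]
  set K := PySem.Set.ofList (List.map (fun p => p.1) pairs) with hK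
  set f : String → Bool := lscAdj ∘ fun k => M.getD k [] with hf
  have key : (List.countP (fun b => b) (List.map f K) = (List.map f K).length) ↔
      (∀ n ∈ List.map Prod.fst pairs, lscAdj (lscGrp pairs n) = true) := by
    rw [List.countP_eq_length]
    constructor
    · intro hAll n hn
      have hnK : n ∈ K := by
        rw [hK, PySem.Set.mem_ofList]
        simpa using hn
      have := hAll _ (List.mem_map_of_mem (f := f) hnK)
      simpa [hf, hget] using this
    · intro hall b hb
      obtain ⟨k, hk, rfl⟩ := List.mem_map.mp hb
      have hkm : k ∈ List.map Prod.fst pairs := by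
        rw [hK, PySem.Set.mem_ofList] at hk
        simpa using hk
      simpa [hf, hget] using hall k hkm
  have hsize : (M.size : Int) = ((List.map f K).length : Int) := by
    rw [List.length_map, ← hkeys]
    simp [PySem.Dict.keys, PySem.Dict.size]
  rw [hsize]
  simp only [beq_iff_eq, Nat.cast_inj]
  split_ifs with hc
  · simp only [true_iff]
    exact key.mp hc
  · simp only [false_iff]
    intro hall
    exact hc (key.mpr hall)

-- B's loop as a function of the processed prefix
def lscF (l : List (String × Int)) : PySem.Dict String Int × Bool :=
  l.foldl
    (fun st p =>
      let ok := if st.1.contains p.1 && decide (p.2 ≤ st.1.getD p.1 0) then false else st.2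
      (st.1.insert p.1 p.2, ok))
    ((PySem.Dict.empty : PySem.Dict String Int), true)

theorem lscF_inv (l : List (String × Int)) :
    (∀ n, (lscF l).1.get? n = (lscGrp l n).getLast?) ∧
    ((lscF l).2 = true ↔ ∀ n ∈ l.map Prod.fst, lscAdj (lscGrp l n) = true) := by
  induction l using List.reverseRecOn with
  | nil => exact ⟨fun n => rfl, by simp [lscF, lscGrp]⟩
  | append_singleton l p ih =>
    obtain ⟨ih1, ih2⟩ := ih
    have hstep : lscF (l ++ [p]) =
        ((lscF l).1.insert p.1 p.2,
         if (lscF l).1.contains p.1 && decide (p.2 ≤ (lscF l).1.getD p.1 0) then false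
         else (lscF l).2) := by
      simp [lscF, List.foldl_append]
    set d := (lscF l).1 with hd
    have hcont : d.contains p.1 = true ↔ lscGrp l p.1 ≠ [] := by
      rw [PySem.Dict.contains_eq_isSome_get?, ih1, Option.isSome_iff_ne_none]
      simp [List.getLast?_eq_none_iff]
    have hgd : d.getD p.1 0 = (lscGrp l p.1).getLast?.getD 0 := by
      rw [PySem.Dict.getD_eq_get?_getD, ih1]
    constructor
    · intro n
      rw [hstep, lscGrp_append_singleton]
      by_cases hnp : n = p.1
      · subst hnp
        rw [PySem.Dict.get?_insert, if_pos rfl, if_pos rfl]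
        simp
      · rw [PySem.Dict.get?_insert, if_neg hnp, if_neg (fun hh => hnp hh.symm),
            List.append_nil, ih1]
    · rw [hstep]
      by_cases hc : d.contains p.1 && decide (p.2 ≤ d.getD p.1 0)
      · rw [if_pos hc]
        simp only [Bool.and_eq_true, decide_eq_true_eq] at hc
        obtain ⟨hc1, hc2⟩ := hc
        have hne : lscGrp l p.1 ≠ [] := hcont.mp hc1
        obtain ⟨a, ha⟩ := Option.isSome_iff_exists.mp (List.getLast?_isSome.mpr hne)
        have hgda : d.getD p.1 0 = a := by rw [hgd, ha]; rfl
        rw [hgda] at hc2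
        rw [show (false = true ↔ (∀ n ∈ List.map Prod.fst (l ++ [p]),
            lscAdj (lscGrp (l ++ [p]) n) = true)) ↔
            ¬ (∀ n ∈ List.map Prod.fst (l ++ [p]), lscAdj (lscGrp (l ++ [p]) n) = true)
          from by simp]
        intro hall
        have := hall p.1 (by simp)
        rw [lscGrp_append_singleton, if_pos rfl, lscAdj_append_singleton, ha] at this
        simp only [Bool.and_eq_true, decide_eq_true_eq] at this
        omega
      · rw [if_neg hc, ih2]
        simp only [Bool.and_eq_true, not_and, decide_eq_true_eq] at hc
        have hlast : (match (lscGrp l p.1).getLast? with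
            | none => true
            | some a => decide (a < p.2)) = true := by
          by_cases hne : lscGrp l p.1 = []
          · simp [hne]
          · obtain ⟨a, ha⟩ := Option.isSome_iff_exists.mp (List.getLast?_isSome.mpr hne)
            have h2 := hc (hcont.mpr hne)
            rw [hgd, ha] at h2
            rw [ha]
            simp only [Option.getD_some, decide_eq_true_eq] at h2 ⊢
            omega
        constructor
        · intro hall n hn
          rw [lscGrp_append_singleton]
          by_cases hnp : p.1 = n
          · subst hnp
            rw [if_pos rfl, lscAdj_append_singleton, hlast]
            by_cases hmem : p.1 ∈ l.map Prod.fst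
            · simp [hall p.1 hmem]
            · simp [lscGrp_of_not_mem l p.1 hmem, lscAdj]
          · rw [if_neg hnp]
            simp only [List.map_append, List.mem_append] at hn
            rcases hn with hn | hn
            · simpa using hall n hn
            · exfalso; exact hnp ((by simpa using hn : (n : String) = p.1)).symm
        · intro hall n hn
          have := hall n (by simp [hn])
          rw [lscGrp_append_singleton] at this
          by_cases hnp : p.1 = n
          · subst hnp
            rw [if_pos rfl, lscAdj_append_singleton] at this
            exact ((Bool.and_eq_true _ _).mp this).1
          · rwa [if_neg hnp, List.append_nil] at this

theorem B_iff (ns : List String) (ss : List Int) :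
    (launchSequenceChecker_alt ns ss = true ↔
      ∀ n ∈ (ns.zip ss).map Prod.fst, lscAdj (lscGrp (ns.zip ss) n) = true) :=
  (lscF_inv (ns.zip ss)).2

-- ===== VERDICT (by name: the statement is the Claim_ definition above) =====
theorem launchSequenceChecker_spec : Claim_equal_launchSequenceChecker := by
  unfold Claim_equal_launchSequenceChecker
  intro ns ss _ hpre
  unfold Spec_launchSequenceChecker
  have h := (A_iff ns ss hpre).trans (B_iff ns ss).symm
  cases hA : launchSequenceChecker ns ss <;> cases hB : launchSequenceChecker_alt ns ss <;>
    simp_all
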